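-- pv_equiv track=rewrite | github.com/wxke/LeetCode-python | 970 强整数.py | powerfulIntegers
-- ===== SOURCE A (Python) =====
-- def powerfulIntegers(x, y, bound):
--     """
--     :type x: int
--     :type y: int
--     :type bound: int
--     :rtype: List[int]
--     """
--     x_list = []
--     y_list = []
--     s = []
--     for i in range(64):
--         a = x**i
--         if a > bound:
--             break
--         x_list.append(a)
--     for i in range(64):
--         a = y**i
--         if a > bound:
--             break
--         y_list.append(a)
--
--     for i in range(bound+1):
--
--         for j in x_list:
--             if j > i :
--                 break
--             if i - j in y_list:
--                 s.append(i)
--                 break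
--     return s
-- ===== SOURCE B (Python) =====
-- def powerfulIntegers(x, y, bound):
--     # Enumerate the powers of x and of y up to bound directly, take all pair
--     # sums within bound, deduplicate with a set and sort.
--     def powers(z):
--         ps = [1]
--         if z > 1:
--             v = z
--             while v <= bound:
--                 ps.append(v)
--                 v *= z
--         return ps
--     return sorted({a + b for a in powers(x) for b in powers(y) if a + b <= bound})
-- ===== Notes on version B (the rewrite author's own statement) =====
-- stated objective: faster
-- what changed: Instead of testing every i in [0, bound] against the power lists, B enumerates the pair sums of the x-powers and y-powers directly, filters by bound, deduplicates with a set and sorts; Pre_ restricts to the problem's natural domain x >= 1 and y >= 1 (plus bound <= 0, where both return []), since for zero or negative bases with positive bound A's in-order scan with break over a non-monotone power list (and its negative 'powers') is accidental behaviour outside LeetCode 970's constraints.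
-- outside the precondition, e.g. on powerfulIntegers(0, 0, 2): A returns [1, 2], B returns [2]; on powerfulIntegers(-2, 2, 10): A returns [2, 3, 5, 6, 8, 9], B returns [2, 3, 5, 9]
import Mathlib
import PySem

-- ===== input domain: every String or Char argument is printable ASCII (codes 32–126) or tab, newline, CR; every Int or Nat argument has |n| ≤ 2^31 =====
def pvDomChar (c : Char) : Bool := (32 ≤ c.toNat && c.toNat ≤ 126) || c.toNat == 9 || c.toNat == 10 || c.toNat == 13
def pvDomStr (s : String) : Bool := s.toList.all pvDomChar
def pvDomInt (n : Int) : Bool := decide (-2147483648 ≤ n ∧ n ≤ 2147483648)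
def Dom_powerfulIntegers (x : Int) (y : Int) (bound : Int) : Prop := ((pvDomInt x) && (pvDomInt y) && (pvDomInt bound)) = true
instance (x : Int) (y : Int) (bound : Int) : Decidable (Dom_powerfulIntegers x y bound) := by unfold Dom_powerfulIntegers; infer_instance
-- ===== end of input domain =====

-- B replaces A's scan of every i in [0, bound] by a direct enumeration of the pair
-- sums of the x-powers and y-powers, deduplicated with a set and sorted.

-- ===== PORT A =====
-- 'for i in range(64): a = x**i; if a > bound: break; x_list.append(a)'
def pvPowList (x bound : Int) : Nat → Nat → List Int
  | 0, _ => []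
  | Nat.succ n, i =>
      let a := x ^ i
      if a > bound then [] else a :: pvPowList x bound n (i + 1)

-- inner 'for j in x_list: if j > i: break; if i - j in y_list: append(i); break'
def pvScan (yl : List Int) (i : Int) : List Int → Bool
  | [] => false
  | j :: rest => if j > i then false else if (i - j) ∈ yl then true else pvScan yl i rest

def powerfulIntegers (x : Int) (y : Int) (bound : Int) : List Int :=
  let xl := pvPowList x bound 64 0
  let yl := pvPowList y bound 64 0
  (PySem.List.pyRange 0 (bound + 1) 1).foldl
    (fun s i => if pvScan yl i xl then s ++ [i] else s) []

-- ===== PORT B =====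
-- 'v = z; while v <= bound: ps.append(v); v *= z'  (fuel 64 only to make the
-- recursion total; inside Dom with z ≥ 2 the loop runs at most 31 times)
def pvGeoB (z bound : Int) : Nat → Int → List Int
  | 0, _ => []
  | Nat.succ n, v => if v ≤ bound then v :: pvGeoB z bound n (v * z) else []

-- 'ps = [1]; if z > 1: <while loop above>'
def pvPowersB (z bound : Int) : List Int :=
  1 :: (if 1 < z then pvGeoB z bound 64 z else [])

def powerfulIntegers_alt (x : Int) (y : Int) (bound : Int) : List Int :=
  let xs := pvPowersB x bound
  let ys := pvPowersB y bound
  -- '{a + b for a in powers(x) for b in powers(y) if a + b <= bound}'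
  let sums := PySem.Set.ofList
    (xs.flatMap (fun a => (ys.filter (fun b => a + b ≤ bound)).map (fun b => a + b)))
  PySem.List.sorted sums (fun v => v) false

-- ===== PRECONDITION & SPEC =====
-- Pre_ restricts to the problem's natural domain x ≥ 1 ∧ y ≥ 1 (LeetCode 970's
-- constraints): for zero or negative bases with a positive bound, A's in-order scan
-- with break over a non-monotone power list (and its negative 'powers') is accidental
-- behaviour; bound ≤ 0 is admitted for every base, both programs returning [] there.
def Pre_powerfulIntegers (x : Int) (y : Int) (bound : Int) : Prop := (1 ≤ x ∧ 1 ≤ y) ∨ bound ≤ 0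
instance (x : Int) (y : Int) (bound : Int) : Decidable (Pre_powerfulIntegers x y bound) := by unfold Pre_powerfulIntegers; infer_instance
def pvWitness_powerfulIntegers : Int × Int × Int := (2, 3, 10)

def Spec_powerfulIntegers (x : Int) (y : Int) (bound : Int) (out : List Int) : Prop := out = powerfulIntegers_alt x y bound
instance (x : Int) (y : Int) (bound : Int) (out : List Int) : Decidable (Spec_powerfulIntegers x y bound out) := by unfold Spec_powerfulIntegers; infer_instance

-- ===== CLAIM (what is proved, stated in full; the proofs are below) =====
def Claim_equal_powerfulIntegers : Prop := ∀ (x : Int) (y : Int) (bound : Int), Dom_powerfulIntegers x y bound → Pre_powerfulIntegers x y bound → Spec_powerfulIntegers x y bound (powerfulIntegers x y bound)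

-- ===== LEMMAS AND PROOFS =====

-- A's exponent-based power loop computes the same list as value accumulation
theorem pvPowList_eq_pvGeoB (x bound : Int) : ∀ (n : Nat) (i : Nat),
    pvPowList x bound n i = pvGeoB x bound n (x ^ i) := by
  intro n
  induction n with
  | zero => intro i; rfl
  | succ n ih =>
      intro i
      simp only [pvPowList, pvGeoB]
      by_cases h : x ^ i > bound
      · simp [h, not_le.mpr h]
      · simp only [if_neg h, if_pos (not_lt.mp h)]
        rw [ih (i + 1), pow_succ]

-- elements of pvGeoB lie between the seed and bound (for z ≥ 1, seed ≥ 1)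
theorem pvGeoB_bounds (z bound : Int) (hz : 1 ≤ z) : ∀ (n : Nat) (v : Int), 1 ≤ v →
    ∀ w ∈ pvGeoB z bound n v, v ≤ w ∧ w ≤ bound := by
  intro n
  induction n with
  | zero => intro v _ w h; simp [pvGeoB] at h
  | succ n ih =>
      intro v hv w h
      simp only [pvGeoB] at h
      by_cases hb : v ≤ bound
      · simp only [if_pos hb, List.mem_cons] at h
        rcases h with h | h
        · subst h; exact ⟨le_refl _, hb⟩
        · have hvz : 1 ≤ v * z := one_le_mul_of_one_le_of_one_le hv hz
          have := ih (v * z) hvz w h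
          have hle : v ≤ v * z := le_mul_of_one_le_right (by omega) hz
          exact ⟨le_trans hle this.1, this.2⟩
      · simp [if_neg hb] at h

-- pvGeoB is nondecreasing (for z ≥ 1, seed ≥ 1)
theorem pvGeoB_pairwise (z bound : Int) (hz : 1 ≤ z) : ∀ (n : Nat) (v : Int), 1 ≤ v →
    (pvGeoB z bound n v).Pairwise (· ≤ ·) := by
  intro n
  induction n with
  | zero => intro v _; simp [pvGeoB]
  | succ n ih =>
      intro v hv
      simp only [pvGeoB]
      by_cases hb : v ≤ bound
      · simp only [if_pos hb]
        have hvz : 1 ≤ v * z := one_le_mul_of_one_le_of_one_le hv hz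
        refine List.Pairwise.cons ?_ (ih (v * z) hvz)
        intro w hw
        have := pvGeoB_bounds z bound hz n (v * z) hvz w hw
        have hle : v ≤ v * z := le_mul_of_one_le_right (by omega) hz
        exact le_trans hle this.1
      · simp [if_neg hb]

-- A's in-order scan with break, over a nondecreasing list, is plain existence
theorem pvScan_iff_sorted (yl : List Int) (i : Int) : ∀ (xs : List Int),
    xs.Pairwise (· ≤ ·) →
    (pvScan yl i xs = true ↔ ∃ j ∈ xs, j ≤ i ∧ (i - j) ∈ yl) := by
  intro xs
  induction xs with
  | nil => intro _; simp [pvScan]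
  | cons j rest ih =>
      intro hpw
      have hrest := (List.pairwise_cons.mp hpw).2
      have hhead := (List.pairwise_cons.mp hpw).1
      simp only [pvScan]
      by_cases hji : j > i
      · simp only [if_pos hji]
        constructor
        · intro h; exact absurd h (by simp)
        · rintro ⟨k, hk, hki, _⟩
          rcases List.mem_cons.mp hk with rfl | hk
          · omega
          · have := hhead k hk; omega
      · simp only [if_neg hji]
        by_cases hy : (i - j) ∈ yl
        · simp only [if_pos hy]
          constructor
          · intro _; exact ⟨j, List.mem_cons_self .., not_lt.mp hji, hy⟩
          · intro _; trivial
        · simp only [if_neg hy]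
          rw [ih hrest]
          constructor
          · rintro ⟨k, hk, h1, h2⟩; exact ⟨k, List.mem_cons_of_mem _ hk, h1, h2⟩
          · rintro ⟨k, hk, h1, h2⟩
            rcases List.mem_cons.mp hk with rfl | hk
            · exact absurd h2 hy
            · exact ⟨k, hk, h1, h2⟩

-- for z = 1 the accumulated list holds only ones
theorem pvGeoB_one_mem (bound : Int) : ∀ (n : Nat), ∀ w ∈ pvGeoB 1 bound n 1, w = 1 := by
  intro n
  induction n with
  | zero => intro w h; simp [pvGeoB] at h
  | succ n ih =>
      intro w h
      simp only [pvGeoB] at h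
      by_cases hb : (1 : Int) ≤ bound
      · simp only [if_pos hb, List.mem_cons] at h
        rcases h with rfl | h
        · rfl
        · exact ih w (by simpa using h)
      · simp [if_neg hb] at h

-- a value beyond bound yields the empty list, whatever the fuel
theorem pvGeoB_nil (z bound v : Int) (h : ¬ v ≤ bound) : ∀ (m : Nat), pvGeoB z bound m v = [] := by
  intro m; cases m <;> simp [pvGeoB, h]

-- more fuel only extends the list (membership is monotone in fuel)
theorem pvGeoB_fuel_mono (z bound : Int) : ∀ (n k : Nat) (v w : Int),
    w ∈ pvGeoB z bound n v → w ∈ pvGeoB z bound (n + k) v := by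
  intro n
  induction n with
  | zero => intro k v w h; simp [pvGeoB] at h
  | succ n ih =>
      intro k v w h
      simp only [pvGeoB] at h
      by_cases hb : v ≤ bound
      · simp only [if_pos hb, List.mem_cons] at h
        have : n + 1 + k = (n + k) + 1 := by omega
        rw [this]
        simp only [pvGeoB, if_pos hb, List.mem_cons]
        rcases h with rfl | h
        · exact Or.inl rfl
        · exact Or.inr (ih k (v * z) w h)
      · simp [if_neg hb] at h

-- once the fuel is enough to exhaust the geometric growth, more fuel changes nothing
theorem pvGeoB_fuel_stable (z bound : Int) (hz : 2 ≤ z) : ∀ (n k : Nat) (v : Int), 2 ≤ v →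
    bound < v * 2 ^ n → pvGeoB z bound (n + k) v = pvGeoB z bound n v := by
  intro n
  induction n with
  | zero =>
      intro k v hv hb
      simp only [pow_zero, mul_one] at hb
      rw [pvGeoB_nil z bound v (by omega) (0 + k), pvGeoB_nil z bound v (by omega) 0]
  | succ n ih =>
      intro k v hv hb
      by_cases hvb : v ≤ bound
      · have : n + 1 + k = (n + k) + 1 := by omega
        rw [this]
        simp only [pvGeoB, if_pos hvb]
        congr 1
        refine ih k (v * z) (by nlinarith) ?_
        have hpow : (0 : Int) < 2 ^ n := by positivity
        have h1 : v * 2 ≤ v * z := by nlinarith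
        have h2 : v * 2 * 2 ^ n ≤ v * z * 2 ^ n := mul_le_mul_of_nonneg_right h1 (le_of_lt hpow)
        have h3 : v * 2 ^ (n + 1) = v * 2 * 2 ^ n := by rw [pow_succ]; ring
        omega
      · rw [pvGeoB_nil z bound v hvb (n + 1 + k), pvGeoB_nil z bound v hvb (n + 1)]

-- elements of B's power list are ≥ 1 (for any base: the loop only runs when z > 1)
theorem pvPowersB_ge_one (z bound : Int) :
    ∀ w ∈ pvPowersB z bound, 1 ≤ w := by
  intro w h
  simp only [pvPowersB, List.mem_cons] at h
  rcases h with rfl | h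
  · exact le_refl _
  · by_cases h1 : 1 < z
    · rw [if_pos h1] at h
      have := pvGeoB_bounds z bound (by omega) 64 z (by omega) w h
      omega
    · rw [if_neg h1] at h; simp at h

-- the key correspondence: membership in A's power list vs B's power list
theorem memA_iff_memB (z bound : Int) (hz : 1 ≤ z) (hb : bound ≤ 2147483648) (w : Int) :
    w ∈ pvGeoB z bound 64 1 ↔ (w ∈ pvPowersB z bound ∧ w ≤ bound) := by
  by_cases h1 : 1 < z
  · -- z ≥ 2
    constructor
    · intro h
      have h64 : (64 : Nat) = 63 + 1 := by omega
      rw [h64] at h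
      simp only [pvGeoB] at h
      by_cases hb1 : (1 : Int) ≤ bound
      · simp only [if_pos hb1, List.mem_cons, one_mul] at h
        rcases h with rfl | h
        · exact ⟨List.mem_cons_self .., hb1⟩
        · have hmem : w ∈ pvGeoB z bound 64 z := by
            have : (64 : Nat) = 63 + 1 := by omega
            rw [this]; exact pvGeoB_fuel_mono z bound 63 1 z w h
          refine ⟨?_, (pvGeoB_bounds z bound hz 63 z (by omega) w h).2⟩
          simp only [pvPowersB, List.mem_cons, if_pos h1]
          exact Or.inr hmem
      · simp [if_neg hb1] at h
    · rintro ⟨h, hwb⟩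
      simp only [pvPowersB, List.mem_cons, if_pos h1] at h
      rcases h with rfl | h
      · have h64 : (64 : Nat) = 63 + 1 := by omega
        rw [h64]
        simp [pvGeoB, hwb]
      · -- w ∈ pvGeoB z bound 64 z; shrink its fuel to 63, then re-attach the head
        have hstable : pvGeoB z bound (63 + 1) z = pvGeoB z bound 63 z := by
          refine pvGeoB_fuel_stable z bound (by omega) 63 1 z (by omega) ?_
          have : (2147483648 : Int) < 2 * 2 ^ 63 := by norm_num
          have hzp : z * 2 ^ 63 ≥ 2 * 2 ^ 63 := by
            have hpow : (0 : Int) < 2 ^ 63 := by positivity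
            nlinarith
          omega
        have h63 : w ∈ pvGeoB z bound 63 z := by
          have : (64 : Nat) = 63 + 1 := by omega
          rw [this, hstable] at h
          exact h
        have hb1 : (1 : Int) ≤ bound := by
          have := (pvGeoB_bounds z bound hz 63 z (by omega) w h63)
          omega
        have h64 : (64 : Nat) = 63 + 1 := by omega
        rw [h64]
        simp only [pvGeoB, if_pos hb1, List.mem_cons, one_mul]
        exact Or.inr h63
  · -- z = 1
    have hz1 : z = 1 := by omega
    subst hz1
    constructor
    · intro h
      have hw1 : w = 1 := pvGeoB_one_mem bound 64 w h
      subst hw1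
      have hb1 : (1 : Int) ≤ bound := by
        have := pvGeoB_bounds 1 bound (le_refl _) 64 1 (le_refl _) 1 h
        exact this.2
      exact ⟨List.mem_cons_self .., hb1⟩
    · rintro ⟨h, hwb⟩
      simp only [pvPowersB, if_neg h1, List.mem_cons, List.not_mem_nil, or_false] at h
      subst h
      have h64 : (64 : Nat) = 63 + 1 := by omega
      rw [h64]
      simp [pvGeoB, hwb]

-- membership in B's sum list
theorem mem_sumsB (x y bound s : Int) :
    (s ∈ (pvPowersB x bound).flatMap (fun a =>
        ((pvPowersB y bound).filter (fun b => a + b ≤ bound)).map (fun b => a + b))) ↔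
      ∃ a ∈ pvPowersB x bound, ∃ b ∈ pvPowersB y bound, a + b ≤ bound ∧ s = a + b := by
  simp only [List.mem_flatMap, List.mem_map, List.mem_filter, decide_eq_true_eq]
  constructor
  · rintro ⟨a, ha, b, ⟨hb, hle⟩, rfl⟩
    exact ⟨a, ha, b, hb, hle, rfl⟩
  · rintro ⟨a, ha, b, hb, hle, rfl⟩
    exact ⟨a, ha, b, ⟨hb, hle⟩, rfl⟩

-- with bound ≤ 0 both programs return []
theorem both_nil_of_bound_nonpos (x y bound : Int) (hb0 : bound ≤ 0) :
    powerfulIntegers x y bound = powerfulIntegers_alt x y bound := by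
  unfold powerfulIntegers powerfulIntegers_alt
  simp only []
  rw [PySem.List.foldl_append_if_eq_filter]
  have hxl : pvPowList x bound 64 0 = [] := by
    have h64 : (64 : Nat) = 63 + 1 := by omega
    rw [h64]
    simp only [pvPowList, pow_zero]
    rw [if_pos (by omega)]
  have hfl : (PySem.List.pyRange 0 (bound + 1) 1).filter
      (fun i => pvScan (pvPowList y bound 64 0) i (pvPowList x bound 64 0)) = [] := by
    rw [List.filter_eq_nil_iff]
    intro i _
    rw [hxl]
    simp [pvScan]
  have hsl : (pvPowersB x bound).flatMap (fun a =>
      ((pvPowersB y bound).filter (fun b => a + b ≤ bound)).map (fun b => a + b)) = [] := by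
    rw [List.flatMap_eq_nil_iff]
    intro a ha
    have ha1 : 1 ≤ a := pvPowersB_ge_one x bound a ha
    have : (pvPowersB y bound).filter (fun b => a + b ≤ bound) = [] := by
      rw [List.filter_eq_nil_iff]
      intro b hbm
      have hb1 : 1 ≤ b := pvPowersB_ge_one y bound b hbm
      simp only [decide_eq_true_eq]
      omega
    rw [this, List.map_nil]
  rw [hfl, hsl]
  rfl

-- ===== VERDICT: the equal case with x, y ≥ 1 =====
theorem powerfulIntegers_eq_of_pos (x y bound : Int) (hx : 1 ≤ x) (hy : 1 ≤ y)
    (hD : Dom_powerfulIntegers x y bound) :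
    powerfulIntegers x y bound = powerfulIntegers_alt x y bound := by
  have hb : bound ≤ 2147483648 := by
    unfold Dom_powerfulIntegers at hD
    simp only [pvDomInt, Bool.and_eq_true, decide_eq_true_eq] at hD
    exact hD.2.2
  unfold powerfulIntegers powerfulIntegers_alt
  simp only []
  rw [PySem.List.foldl_append_if_eq_filter]
  rw [pvPowList_eq_pvGeoB x bound 64 0, pvPowList_eq_pvGeoB y bound 64 0]
  simp only [pow_zero, List.nil_append]
  set Xb := pvPowersB x bound with hXb
  set Yb := pvPowersB y bound with hYb
  set fl := (PySem.List.pyRange 0 (bound + 1) 1).filter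
      (fun i => pvScan (pvGeoB y bound 64 1) i (pvGeoB x bound 64 1)) with hfl
  set sl := Xb.flatMap (fun a => (Yb.filter (fun b => a + b ≤ bound)).map (fun b => a + b)) with hsl
  have hmem : ∀ s : Int, s ∈ fl ↔ s ∈ PySem.Set.ofList sl := by
    intro s
    rw [hfl, List.mem_filter, PySem.List.mem_pyRange_one, PySem.Set.mem_ofList, hsl,
        mem_sumsB x y bound s]
    have hpw : (pvGeoB x bound 64 1).Pairwise (· ≤ ·) :=
      pvGeoB_pairwise x bound hx 64 1 (le_refl _)
    rw [pvScan_iff_sorted (pvGeoB y bound 64 1) s (pvGeoB x bound 64 1) hpw]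
    constructor
    · rintro ⟨⟨_, hlt⟩, a, ha, has, hya⟩
      have haB := (memA_iff_memB x bound hx hb a).mp ha
      have hyB := (memA_iff_memB y bound hy hb (s - a)).mp hya
      exact ⟨a, haB.1, s - a, hyB.1, by omega, by ring⟩
    · rintro ⟨a, ha, b, hbm, hle, rfl⟩
      have ha1 : 1 ≤ a := pvPowersB_ge_one x bound a ha
      have hb1 : 1 ≤ b := pvPowersB_ge_one y bound b hbm
      have haA : a ∈ pvGeoB x bound 64 1 :=
        (memA_iff_memB x bound hx hb a).mpr ⟨ha, by omega⟩
      have hbA : b ∈ pvGeoB y bound 64 1 :=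
        (memA_iff_memB y bound hy hb b).mpr ⟨hbm, by omega⟩
      refine ⟨⟨by omega, by omega⟩, a, haA, by omega, ?_⟩
      have : a + b - a = b := by ring
      rw [this]
      exact hbA
  have hnd_fl : fl.Nodup := List.Nodup.filter _ (PySem.List.nodup_pyRange_one 0 (bound + 1))
  have hpw_fl : fl.Pairwise (· < ·) := List.Pairwise.filter _ (PySem.List.pairwise_lt_pyRange_one 0 (bound + 1))
  have hperm : fl.Perm (PySem.Set.ofList sl) :=
    (List.perm_ext_iff_of_nodup hnd_fl (PySem.Set.nodup_ofList sl)).mpr hmem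
  exact (PySem.List.sorted_eq_of_perm_of_pairwise_lt _ _ _ hperm hpw_fl).symm

-- ===== VERDICT (by name: the statement is the Claim_ definition above) =====
theorem powerfulIntegers_spec : Claim_equal_powerfulIntegers := by
  intro x y bound hD hP
  unfold Spec_powerfulIntegers
  rcases hP with ⟨hx, hy⟩ | hb0
  · exact powerfulIntegers_eq_of_pos x y bound hx hy hD
  · exact both_nil_of_bound_nonpos x y bound hb0
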